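-- pv_equiv track=rewrite | github.com/jyansir/tp-berta | scripts/clean_feat_names.py | check_upper_num
-- ===== SOURCE A (Python) =====
-- def check_upper_num(x: str):
--     x1, x2 = list(x), list(x.lower())
--     num_upper = sum([c1 != c2 for c1, c2 in zip(x1, x2)])
--     if num_upper > 1:
--         return True
--     if num_upper == 1 and x[0].lower() == x[0]:
--         return True
--     return False
-- ===== SOURCE B (Python) =====
-- def check_upper_num(x: str):
--     return any(c != c.lower() for c in x[1:])
-- ===== Notes on version B (the rewrite author's own statement) =====
-- stated objective: simpler
-- what changed: Replaces the counted comparison of x with x.lower() plus a two-branch case split on the first character by one short-circuiting any() over x[1:], using the observation that A returns True exactly when some character at index >= 1 differs from its lowercase form.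
import Mathlib
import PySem

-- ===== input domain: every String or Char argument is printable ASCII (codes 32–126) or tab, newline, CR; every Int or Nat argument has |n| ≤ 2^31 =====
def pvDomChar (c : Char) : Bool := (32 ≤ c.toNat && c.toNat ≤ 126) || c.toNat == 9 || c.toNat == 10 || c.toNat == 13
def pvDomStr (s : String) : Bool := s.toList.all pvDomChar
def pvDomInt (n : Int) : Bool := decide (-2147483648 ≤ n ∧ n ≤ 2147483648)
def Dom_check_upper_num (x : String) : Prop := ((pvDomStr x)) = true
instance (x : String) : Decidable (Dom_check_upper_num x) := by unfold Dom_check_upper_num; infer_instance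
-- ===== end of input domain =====

-- B replaces A's count of case-changed positions plus a two-branch first-character
-- case split by one short-circuiting any() over x[1:] (simpler).

-- ===== PORT A =====
def check_upper_num (x : String) : Bool :=
  let x1 := x.toList
  let x2 := (PySem.Str.lower x).toList
  let num_upper : Int := ((x1.zip x2).map (fun p => if p.1 ≠ p.2 then (1:Int) else 0)).sum
  if num_upper > 1 then true
  else if num_upper = 1 &&
      (match PySem.List.pyGet? x.toList 0 with
       | some c => PySem.Chars.lowerChar c == c
       | none => false) then true   -- none branch unreachable: num_upper = 1 forces x nonempty
  else false

-- ===== PORT B =====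
def check_upper_num_alt (x : String) : Bool :=
  (PySem.List.slice x.toList (some 1) none).any (fun c => c ≠ PySem.Chars.lowerChar c)

-- ===== PRECONDITION & SPEC =====
def Spec_check_upper_num (x : String) (out : Bool) : Prop := out = check_upper_num_alt x
instance (x : String) (out : Bool) : Decidable (Spec_check_upper_num x out) := by unfold Spec_check_upper_num; infer_instance

-- ===== CLAIM (what is proved, stated in full; the proofs are below) =====
def Claim_equal_check_upper_num : Prop := ∀ (x : String), Dom_check_upper_num x → Spec_check_upper_num x (check_upper_num x)

-- ===== LEMMAS AND PROOFS =====

lemma pv_lower_eq_map : PySem.Chars.lower = List.map PySem.Chars.lowerChar := rfl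

-- A's zipped sum counts the characters changed by lowering
lemma pv_sum_eq_countP (l : List Char) :
    ((l.zip (PySem.Chars.lower l)).map (fun p => if p.1 ≠ p.2 then (1:Int) else 0)).sum
      = (l.countP (fun c => c ≠ PySem.Chars.lowerChar c) : Int) := by
  rw [pv_lower_eq_map]
  induction l with
  | nil => simp
  | cons c t ih =>
    simp only [List.map_cons, List.zip_cons_cons, List.sum_cons, List.countP_cons, ih,
      ne_eq, decide_eq_true_eq]
    push_cast
    split_ifs <;> ring

-- B's short-circuiting any is "the count over the tail is positive"
lemma pv_any_eq_countP (l : List Char) :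
    l.any (fun c => c ≠ PySem.Chars.lowerChar c)
      = decide (0 < l.countP (fun c => c ≠ PySem.Chars.lowerChar c)) := by
  induction l with
  | nil => simp
  | cons c t ih =>
    simp only [List.any_cons, ih, List.countP_cons, ne_eq]
    split_ifs with h <;> simp [h]

-- first char not upper: A reads "count > 1, or count = 1", i.e. count positive
lemma pv_arith (N : Nat) :
    (if (N:Int) > 1 then true else if decide ((N:Int) = 1) = true then true else false)
      = decide (0 < N) := by
  by_cases h1 : (N:Int) > 1
  · rw [if_pos h1]; symm; rw [decide_eq_true_eq]; omega
  · rw [if_neg h1]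
    by_cases h2 : (N:Int) = 1
    · rw [if_pos (by simp [h2])]; symm; rw [decide_eq_true_eq]; omega
    · rw [if_neg (by simp [h2])]; symm; rw [decide_eq_false_iff_not]; omega

-- first char upper: A reads "tail count + 1 > 1", i.e. tail count positive
lemma pv_arith2 (N : Nat) :
    (if ((N + 1 : Nat) : Int) > 1 then true else false) = decide (0 < N) := by
  by_cases h : ((N + 1 : Nat) : Int) > 1
  · rw [if_pos h]; symm; rw [decide_eq_true_eq]; omega
  · rw [if_neg h]; symm; rw [decide_eq_false_iff_not]; omega

-- ===== VERDICT (by name: the statement is the Claim_ definition above) =====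
theorem check_upper_num_spec : Claim_equal_check_upper_num := by
  intro x _
  unfold Spec_check_upper_num check_upper_num check_upper_num_alt
  dsimp only
  rw [PySem.Str.toList_lower, pv_sum_eq_countP, PySem.List.slice_from_one, pv_any_eq_countP]
  cases h : x.toList with
  | nil => simp
  | cons c t =>
    have hget : PySem.List.pyGet? (c :: t) (0 : Int) = some c := by
      simp [PySem.List.pyGet?, PySem.List.pyIdx?]
    simp only [List.countP_cons, List.tail_cons, hget]
    by_cases hb : PySem.Chars.lowerChar c = c
    · rw [show decide (c ≠ PySem.Chars.lowerChar c) = false from decide_eq_false (fun hh => hh hb.symm),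
          show (PySem.Chars.lowerChar c == c) = true from beq_iff_eq.mpr hb]
      simp only [Bool.false_eq_true, if_false, Nat.add_zero, Bool.and_true]
      exact pv_arith _
    · rw [show decide (c ≠ PySem.Chars.lowerChar c) = true from decide_eq_true (fun e => hb e.symm),
          show (PySem.Chars.lowerChar c == c) = false from beq_eq_false_iff_ne.mpr hb]
      simp only [if_true, Bool.and_false, Bool.false_eq_true, if_false]
      exact pv_arith2 _
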